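-- pv_equiv track=rewrite | github.com/lexisvar/caissify_vision | src/board_state.py | _compress_row
-- ===== SOURCE A (Python) =====
-- def _compress_row(chars: list[str]) -> str:
--     """
--     Compress a row of 8 FEN characters by merging consecutive '1's into a count.
--     e.g. ['1','1','r','1','1','1','1','1'] → '2r5'
--     """
--     result = ""
--     empty_count = 0
--     for c in chars:
--         if c == "1":
--             empty_count += 1
--         else:
--             if empty_count:
--                 result += str(empty_count)
--                 empty_count = 0
--             result += c
--     if empty_count:
--         result += str(empty_count)
--     return result
-- ===== SOURCE B (Python) =====
-- def _compress_row(chars: list[str]) -> str: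
--     """Index-based run scanner: emit each maximal run directly (a count for '1'-runs,
--     the piece otherwise) into a list of pieces, joined once at the end."""
--     pieces = []
--     n = len(chars)
--     i = 0
--     while i < n:
--         c = chars[i]
--         if c == "1":
--             j = i
--             while j < n and chars[j] == "1":
--                 j += 1
--             pieces.append(str(j - i))
--             i = j
--         else:
--             pieces.append(c)
--             i += 1
--     return "".join(pieces)
-- ===== Notes on version B (the rewrite author's own statement) =====
-- stated objective: alternative
-- what changed: Replaces the stateful character loop carrying a pending empty-count with conditional flushes by an index-based run scanner: an inner scan finds the end of each maximal '1'-run, each run is emitted as one piece into a list, and the pieces are joined once at the end.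
import Mathlib
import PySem

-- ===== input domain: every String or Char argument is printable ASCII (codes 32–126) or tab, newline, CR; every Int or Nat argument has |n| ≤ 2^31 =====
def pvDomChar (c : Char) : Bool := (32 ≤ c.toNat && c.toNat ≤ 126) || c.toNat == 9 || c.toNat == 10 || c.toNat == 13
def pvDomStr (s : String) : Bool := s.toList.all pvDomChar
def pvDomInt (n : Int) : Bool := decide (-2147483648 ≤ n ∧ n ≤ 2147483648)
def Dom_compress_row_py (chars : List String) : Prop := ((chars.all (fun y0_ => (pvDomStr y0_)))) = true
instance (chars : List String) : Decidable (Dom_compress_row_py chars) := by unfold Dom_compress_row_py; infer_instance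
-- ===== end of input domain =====

-- B replaces A's pending-counter accumulator loop by an index-based run scanner that emits one piece per maximal run and joins once; alternative decomposition, same cost.

-- ===== PORT A =====
-- the for-loop over chars carrying (result, empty_count); 'if empty_count:' is 'empty_count ≠ 0'
def compressRowLoopA : List String → String → Int → String
  | [], result, empty_count =>
      if empty_count ≠ 0 then result ++ PySem.Int.toStr empty_count else result
  | c :: rest, result, empty_count =>
      if c == "1" then
        compressRowLoopA rest result (empty_count + 1)
      else
        compressRowLoopA rest
          ((if empty_count ≠ 0 then result ++ PySem.Int.toStr empty_count else result) ++ c) 0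

def compress_row_py (chars : List String) : String :=
  compressRowLoopA chars "" 0

-- ===== PORT B =====
-- the inner 'while j < n and chars[j] == "1": j += 1' scan; 'chars[j]' is exact as getD since
-- the short-circuited 'j < n' guarantees the index is in range
def pvRunEnd (chars : List String) (n : Nat) (j : Nat) : Nat :=
  if decide (j < n) && (chars.getD j "" == "1") then pvRunEnd chars n (j + 1) else j
  termination_by n - j
  decreasing_by
    rename_i h
    simp only [Bool.and_eq_true, decide_eq_true_eq] at h
    omega

-- loop-bound lemmas the outer loop's termination needs
theorem pvRunEnd_ge (chars : List String) (n : Nat) :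
    ∀ (fuel j : Nat), n - j ≤ fuel → j ≤ pvRunEnd chars n j := by
  intro fuel
  induction fuel with
  | zero =>
      intro j hf
      rw [pvRunEnd, if_neg (by simp; omega)]
  | succ m ih =>
      intro j hf
      rw [pvRunEnd]
      split
      · rename_i h
        simp only [Bool.and_eq_true, decide_eq_true_eq] at h
        exact Nat.le_trans (Nat.le_succ j) (ih (j + 1) (by omega))
      · exact Nat.le_refl j

theorem pvRunEnd_gt (chars : List String) (n j : Nat) (h1 : j < n)
    (h2 : (chars.getD j "" == "1") = true) : j < pvRunEnd chars n j := by
  rw [pvRunEnd, if_pos (by rw [h2]; simp [h1])]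
  exact Nat.lt_of_lt_of_le (Nat.lt_succ_self j) (pvRunEnd_ge chars n (n - (j + 1)) (j + 1) (Nat.le_refl _))

-- the outer 'while i < n' loop carrying (i, pieces)
def pvBLoop (chars : List String) (n : Nat) (i : Nat) (pieces : List String) : List String :=
  if h : i < n then
    if hc : chars.getD i "" == "1" then
      pvBLoop chars n (pvRunEnd chars n i)
        (pieces ++ [PySem.Int.toStr ((pvRunEnd chars n i : Int) - (i : Int))])
    else
      pvBLoop chars n (i + 1) (pieces ++ [chars.getD i ""])
  else pieces
  termination_by n - i
  decreasing_by
  · have := pvRunEnd_gt chars n i h hc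
    omega
  · omega

def compress_row_py_alt (chars : List String) : String :=
  PySem.Str.join "" (pvBLoop chars chars.length 0 [])

-- ===== PRECONDITION & SPEC =====
def Spec_compress_row_py (chars : List String) (out : String) : Prop := out = compress_row_py_alt chars
instance (chars : List String) (out : String) : Decidable (Spec_compress_row_py chars out) := by unfold Spec_compress_row_py; infer_instance

-- ===== CLAIM (what is proved, stated in full; the proofs are below) =====
def Claim_equal_compress_row_py : Prop := ∀ (chars : List String), Dom_compress_row_py chars → Spec_compress_row_py chars (compress_row_py chars)

-- ===== LEMMAS AND PROOFS =====
-- proof-side run-length functions mediating between the two ports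
def pvNatLead : List String → Nat
  | [] => 0
  | c :: rest => if c == "1" then pvNatLead rest + 1 else 0

def pvDropOnes : List String → List String
  | [] => []
  | c :: rest => if c == "1" then pvDropOnes rest else c :: rest

theorem pvDropOnes_length_le : ∀ (l : List String), (pvDropOnes l).length ≤ l.length
  | [] => Nat.le_refl _
  | c :: rest => by
      unfold pvDropOnes
      by_cases h : c == "1"
      · simp [h]; exact Nat.le_succ_of_le (pvDropOnes_length_le rest)
      · simp [h]

-- recursive run-length compression: the common specification both loops are reduced to
def pvRec : List String → String
  | [] => ""
  | c :: rest =>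
      if c == "1" then
        PySem.Int.toStr (1 + (pvNatLead rest : Int)) ++ pvRec (pvDropOnes rest)
      else
        c ++ pvRec rest
  termination_by l => l.length
  decreasing_by
  · exact Nat.lt_succ_of_le (pvDropOnes_length_le rest)
  · simp

theorem pvDrop_natLead (l : List String) : l.drop (pvNatLead l) = pvDropOnes l := by
  induction l with
  | nil => simp [pvNatLead, pvDropOnes]
  | cons c rest ih =>
      by_cases h : c == "1"
      · simp only [pvNatLead, pvDropOnes, h, if_true]
        simpa using ih
      · simp [pvNatLead, pvDropOnes, h]

theorem join_empty_cons (p : String) (ps : List String) :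
    PySem.Str.join "" (p :: ps) = p ++ PySem.Str.join "" ps := by
  rw [← String.toList_inj]
  cases ps with
  | nil => simp [PySem.Str.join, PySem.Chars.join, List.intercalate]
  | cons q qs => simp [PySem.Str.join, PySem.Chars.join_cons_cons]

-- invariant of A's loop, by strong induction on the list length:
-- with a zero pending count the loop computes result ++ pvRec; with a positive pending count it
-- flushes count + (leading "1"s) and continues as pvRec on the remainder.
theorem compressRowLoopA_key : ∀ (n : Nat) (chars : List String), chars.length ≤ n →
    ∀ (result : String),
      (compressRowLoopA chars result 0 = result ++ pvRec chars) ∧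
      (∀ cnt : Int, 0 < cnt →
        compressRowLoopA chars result cnt =
          result ++ PySem.Int.toStr (cnt + (pvNatLead chars : Int)) ++ pvRec (pvDropOnes chars)) := by
  intro n
  induction n with
  | zero =>
      intro chars hlen result
      have hnil : chars = [] := List.eq_nil_of_length_eq_zero (Nat.le_zero.mp hlen)
      subst hnil
      refine ⟨by simp [compressRowLoopA, pvRec], ?_⟩
      intro cnt hcnt
      show (if cnt ≠ 0 then result ++ PySem.Int.toStr cnt else result) = _
      rw [if_pos (by omega : cnt ≠ 0)]
      simp [pvNatLead, pvDropOnes, pvRec]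
  | succ m ih =>
      intro chars hlen result
      match chars with
      | [] =>
          refine ⟨by simp [compressRowLoopA, pvRec], ?_⟩
          intro cnt hcnt
          show (if cnt ≠ 0 then result ++ PySem.Int.toStr cnt else result) = _
          rw [if_pos (by omega : cnt ≠ 0)]
          simp [pvNatLead, pvDropOnes, pvRec]
      | c :: rest =>
          have hrest : rest.length ≤ m := by simpa using Nat.succ_le_succ_iff.mp hlen
          by_cases hc : c = "1"
          · have hb : (c == "1") = true := by simp [hc]
            constructor
            · have h1 := (ih rest hrest result).2 1 (by omega)
              show compressRowLoopA (c :: rest) result 0 = _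
              simp only [compressRowLoopA, hb, if_true, zero_add]
              rw [h1]
              rw [String.append_assoc]
              simp only [pvRec, hb, if_true]
            · intro cnt hcnt
              have h1 := (ih rest hrest result).2 (cnt + 1) (by omega)
              show compressRowLoopA (c :: rest) result cnt = _
              simp only [compressRowLoopA, hb, if_true]
              rw [h1]
              have heq : cnt + 1 + (pvNatLead rest : Int) = cnt + (pvNatLead (c :: rest) : Int) := by
                simp only [pvNatLead, hb, if_true]; push_cast; ring
              rw [heq]
              simp only [pvDropOnes, hb, if_true]
          · have hb : (c == "1") = false := by simp [hc]
            have hl : (pvNatLead (c :: rest) : Int) = 0 := by simp only [pvNatLead, hb]; simp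
            have hd : pvDropOnes (c :: rest) = c :: rest := by simp only [pvDropOnes, hb]; simp
            constructor
            · have h0 := (ih rest hrest (result ++ c)).1
              show compressRowLoopA (c :: rest) result 0 = _
              simp only [compressRowLoopA, hb]
              rw [if_neg (by simp), if_neg (by omega : ¬ (0 : Int) ≠ 0), h0]
              simp only [pvRec, hb]
              rw [if_neg (by simp), String.append_assoc]
            · intro cnt hcnt
              have h0 := (ih rest hrest (result ++ PySem.Int.toStr cnt ++ c)).1
              show compressRowLoopA (c :: rest) result cnt = _
              simp only [compressRowLoopA, hb]
              rw [if_neg (by simp), if_pos (by omega : cnt ≠ 0), h0, hl, hd]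
              simp only [pvRec, hb]
              rw [if_neg (by simp)]
              simp [String.append_assoc]

-- the inner scan lands one maximal "1"-run further
theorem pvRunEnd_eq : ∀ (fuel : Nat) (chars : List String) (j : Nat),
    chars.length - j ≤ fuel →
    pvRunEnd chars chars.length j = j + pvNatLead (chars.drop j) := by
  intro fuel
  induction fuel with
  | zero =>
      intro chars j hf
      have hj : chars.length ≤ j := by omega
      rw [pvRunEnd, if_neg (by simp; omega)]
      simp [List.drop_eq_nil_of_le hj, pvNatLead]
  | succ m ih =>
      intro chars j hf
      by_cases hj : j < chars.length
      · have hdrop : chars.drop j = chars[j] :: chars.drop (j + 1) :=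
          List.drop_eq_getElem_cons hj
        have hget : chars.getD j "" = chars[j] := List.getD_eq_getElem chars "" hj
        by_cases h1 : chars[j] == "1"
        · have hb : (chars.getD j "" == "1") = true := by rw [hget]; exact h1
          rw [pvRunEnd, if_pos (by rw [hb]; simp [hj])]
          rw [ih chars (j + 1) (by omega)]
          rw [hdrop]
          simp only [pvNatLead, h1, if_true]
          omega
        · have hb : (chars.getD j "" == "1") = false := by rw [hget]; simpa using h1
          rw [pvRunEnd, if_neg (by rw [hb]; simp)]
          rw [hdrop]
          simp only [pvNatLead, h1]
          simp
      · rw [pvRunEnd, if_neg (by simp; omega)]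
        simp [List.drop_eq_nil_of_le (by omega : chars.length ≤ j), pvNatLead]

-- pieces emitted by B's outer loop, as a function of the remaining suffix
def pvPieces : List String → List String
  | [] => []
  | c :: rest =>
      if c == "1" then
        PySem.Int.toStr (1 + (pvNatLead rest : Int)) :: pvPieces (pvDropOnes rest)
      else
        c :: pvPieces rest
  termination_by l => l.length
  decreasing_by
  · exact Nat.lt_succ_of_le (pvDropOnes_length_le rest)
  · simp

-- invariant of B's outer loop
theorem pvBLoop_eq : ∀ (fuel : Nat) (chars : List String) (i : Nat) (pieces : List String),
    chars.length - i ≤ fuel →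
    pvBLoop chars chars.length i pieces = pieces ++ pvPieces (chars.drop i) := by
  intro fuel
  induction fuel with
  | zero =>
      intro chars i pieces hf
      have hi : chars.length ≤ i := by omega
      rw [pvBLoop, dif_neg (by omega)]
      simp [List.drop_eq_nil_of_le hi, pvPieces]
  | succ m ih =>
      intro chars i pieces hf
      by_cases hi : i < chars.length
      · have hdrop : chars.drop i = chars[i] :: chars.drop (i + 1) :=
          List.drop_eq_getElem_cons hi
        have hget : chars.getD i "" = chars[i] := List.getD_eq_getElem chars "" hi
        by_cases h1 : chars[i] == "1"
        · have hb : (chars.getD i "" == "1") = true := by rw [hget]; exact h1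
          have hre := pvRunEnd_eq (m + 1) chars i (by omega)
          rw [hdrop] at hre
          simp only [pvNatLead, h1, if_true] at hre
          rw [pvBLoop, dif_pos hi, dif_pos hb]
          rw [ih chars (pvRunEnd chars chars.length i)
                (pieces ++ [PySem.Int.toStr ((pvRunEnd chars chars.length i : Int) - (i : Int))])
                (by omega)]
          have hdrop2 : chars.drop (pvRunEnd chars chars.length i) =
              pvDropOnes (chars.drop (i + 1)) := by
            rw [hre, show i + (pvNatLead (chars.drop (i + 1)) + 1) =
                  (i + 1) + pvNatLead (chars.drop (i + 1)) by omega,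
                ← List.drop_drop, pvDrop_natLead]
          have hstr : ((pvRunEnd chars chars.length i : Int) - (i : Int)) =
              1 + (pvNatLead (chars.drop (i + 1)) : Int) := by
            rw [hre]; push_cast; ring
          rw [hdrop2, hstr, hdrop]
          conv_rhs => rw [pvPieces]
          rw [if_pos h1]
          simp
        · have hb : (chars.getD i "" == "1") = false := by rw [hget]; simpa using h1
          rw [pvBLoop, dif_pos hi, dif_neg (by rw [hb]; simp)]
          rw [ih chars (i + 1) (pieces ++ [chars.getD i ""]) (by omega), hget]
          rw [hdrop]
          conv_rhs => rw [pvPieces]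
          rw [if_neg (by simp [h1] : ¬ ((chars[i] == "1") = true))]
          simp
      · rw [pvBLoop, dif_neg (by omega)]
        simp [List.drop_eq_nil_of_le (by omega : chars.length ≤ i), pvPieces]

-- joining the emitted pieces gives the recursive compression
theorem join_pvPieces : ∀ (fuel : Nat) (l : List String), l.length ≤ fuel →
    PySem.Str.join "" (pvPieces l) = pvRec l := by
  intro fuel
  induction fuel with
  | zero =>
      intro l hl
      have : l = [] := List.eq_nil_of_length_eq_zero (Nat.le_zero.mp hl)
      subst this
      simp [pvPieces, pvRec, PySem.Str.join, PySem.Chars.join, List.intercalate]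
  | succ m ih =>
      intro l hl
      match l with
      | [] =>
          simp [pvPieces, pvRec, PySem.Str.join, PySem.Chars.join, List.intercalate]
      | c :: rest =>
          have hrest : rest.length ≤ m := by simpa using Nat.succ_le_succ_iff.mp hl
          by_cases h1 : c == "1"
          · simp only [pvPieces, pvRec, h1, if_true]
            rw [join_empty_cons,
                ih (pvDropOnes rest) (Nat.le_trans (pvDropOnes_length_le rest) hrest)]
          · simp only [pvPieces, pvRec, h1]
            rw [if_neg (by simpa using h1), if_neg (by simpa using h1), join_empty_cons,
                ih rest hrest]

-- ===== VERDICT (by name: the statement is the Claim_ definition above) =====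
theorem compress_row_py_spec : Claim_equal_compress_row_py := by
  intro chars _
  unfold Spec_compress_row_py compress_row_py compress_row_py_alt
  have hA := (compressRowLoopA_key chars.length chars (Nat.le_refl _) "").1
  have hB := pvBLoop_eq chars.length chars 0 [] (by omega)
  rw [hA, hB]
  simp only [List.drop_zero, List.nil_append]
  rw [join_pvPieces chars.length chars (Nat.le_refl _)]
  simp
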